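-- pv_equiv track=rewrite | github.com/vngonugondla/NYT-Connections-Solver | few-shot_prompting.py | groups_match
-- ===== SOURCE A (Python) =====
-- def groups_match(pred_groups, true_groups):
--     matched = 0
--     used = set()
--     for pg in pred_groups:
--         for i, tg in enumerate(true_groups):
--             if i not in used and pg == tg:
--                 matched += 1
--                 used.add(i)
--                 break
--     return matched
-- ===== SOURCE B (Python) =====
-- def groups_match(pred_groups, true_groups):
--     true_counts = {}
--     for tg in true_groups:
--         k = tuple(tg)
--         true_counts[k] = true_counts.get(k, 0) + 1
--     pred_counts = {}
--     for pg in pred_groups: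
--         k = tuple(pg)
--         pred_counts[k] = pred_counts.get(k, 0) + 1
--     total = 0
--     for k, c in pred_counts.items():
--         total += min(c, true_counts.get(k, 0))
--     return total
-- ===== Notes on version B (the rewrite author's own statement) =====
-- stated objective: alternative
-- what changed: Replaces the greedy nested scan with a used-index set by two frequency tables (keyed by tuple(group)) and returns the multiset-intersection size sum(min(pred_count, true_count)).
import Mathlib
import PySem

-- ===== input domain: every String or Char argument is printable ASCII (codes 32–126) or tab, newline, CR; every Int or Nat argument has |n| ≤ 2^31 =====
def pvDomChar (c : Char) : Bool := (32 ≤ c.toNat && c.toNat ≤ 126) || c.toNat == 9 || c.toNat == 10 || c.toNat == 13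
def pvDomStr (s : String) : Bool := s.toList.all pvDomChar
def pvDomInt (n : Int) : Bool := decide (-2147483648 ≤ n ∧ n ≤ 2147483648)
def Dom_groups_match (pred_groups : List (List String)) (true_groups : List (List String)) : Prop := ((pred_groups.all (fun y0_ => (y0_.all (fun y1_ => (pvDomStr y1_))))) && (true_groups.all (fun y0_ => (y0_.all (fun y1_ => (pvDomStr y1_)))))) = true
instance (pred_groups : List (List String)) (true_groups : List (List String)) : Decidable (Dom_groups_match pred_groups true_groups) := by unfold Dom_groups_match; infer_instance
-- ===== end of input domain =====

-- B replaces A's greedy nested scan with a used-index set by two frequency tables and a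
-- sum of per-group minima (multiset-intersection size); the return values are proved equal.

-- ===== PORT A =====
-- A's inner 'for i, tg in enumerate(true_groups): … break' loop; state st = (matched, used)
def gmInner (pg : List String) (pairs : List (Int × List String)) (st : Int × PySem.Set Int) :
    Int × PySem.Set Int :=
  match pairs with
  | [] => st
  | (i, tg) :: rest =>
    if ¬ PySem.Set.contains st.2 i = true ∧ pg = tg then (st.1 + 1, PySem.Set.add st.2 i)
    else gmInner pg rest st

def groups_match (pred_groups : List (List String)) (true_groups : List (List String)) : Int :=
  (pred_groups.foldl (fun st pg => gmInner pg (PySem.List.enumerate true_groups) st)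
    (0, PySem.Set.empty)).1

-- ===== PORT B =====
-- B's 'counts[k] = counts.get(k, 0) + 1' loop (keys: Python tuple(group) ↔ the list itself)
def gmCounter (gs : List (List String)) : PySem.Dict (List String) Int :=
  gs.foldl (fun d g => d.insert g (d.getD g 0 + 1)) PySem.Dict.empty

def groups_match_alt (pred_groups : List (List String)) (true_groups : List (List String)) : Int :=
  let true_counts := gmCounter true_groups
  let pred_counts := gmCounter pred_groups
  pred_counts.items.foldl (fun total kc => total + min kc.2 (true_counts.getD kc.1 0)) 0

-- ===== PRECONDITION & SPEC =====
def Spec_groups_match (pred_groups : List (List String)) (true_groups : List (List String)) (out : Int) : Prop := out = groups_match_alt pred_groups true_groups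
instance (pred_groups : List (List String)) (true_groups : List (List String)) (out : Int) : Decidable (Spec_groups_match pred_groups true_groups out) := by unfold Spec_groups_match; infer_instance

-- ===== CLAIM (what is proved, stated in full; the proofs are below) =====
def Claim_equal_groups_match : Prop := ∀ (pred_groups : List (List String)) (true_groups : List (List String)), Dom_groups_match pred_groups true_groups → Spec_groups_match pred_groups true_groups (groups_match pred_groups true_groups)

-- ===== LEMMAS AND PROOFS =====

-- the multiset of true groups whose index is still unused
def pvRem (pairs : List (Int × List String)) (used : PySem.Set Int) : List (List String) :=
  (pairs.filter (fun p => !(PySem.Set.contains used p.1))).map (·.2)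

-- greedy matcher on the remaining multiset (abstract form of A's loops)
def pvM (ps : List (List String)) (rem : List (List String)) : Nat :=
  match ps with
  | [] => 0
  | p :: ps' => if p ∈ rem then 1 + pvM ps' (rem.erase p) else pvM ps' rem

-- multiset-intersection size (abstract form of B)
def pvT (ps : List (List String)) (rem : List (List String)) : Nat :=
  ∑ k ∈ ps.toFinset, min (ps.count k) (rem.count k)

lemma gmInner_spec (pg : List String) :
    ∀ (pairs : List (Int × List String)) (m : Int) (used : PySem.Set Int),
    (pairs.map (·.1)).Nodup →
    (gmInner pg pairs (m, used)).1 = m + (if pg ∈ pvRem pairs used then 1 else 0)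
    ∧ pvRem pairs (gmInner pg pairs (m, used)).2 = (pvRem pairs used).erase pg
    ∧ (∀ j, j ∈ used → j ∈ (gmInner pg pairs (m, used)).2)
    ∧ (∀ j, j ∈ (gmInner pg pairs (m, used)).2 → j ∈ used ∨ j ∈ pairs.map (·.1)) := by
  intro pairs
  induction pairs with
  | nil => intro m used _; simp [gmInner, pvRem]
  | cons hd rest ih =>
    obtain ⟨i, tg⟩ := hd
    intro m used hnd
    simp only [List.map_cons, List.nodup_cons] at hnd
    obtain ⟨hi, hndr⟩ := hnd
    by_cases hc : i ∈ used
    · have hgm : gmInner pg ((i,tg)::rest) (m, used) = gmInner pg rest (m, used) := by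
        simp [gmInner, hc]
      obtain ⟨h1, h2, h3, h4⟩ := ih m used hndr
      have hrem : pvRem ((i,tg)::rest) used = pvRem rest used := by
        simp [pvRem, hc]
      have hc2 : i ∈ (gmInner pg rest (m,used)).2 := h3 i hc
      have hrem2 : pvRem ((i,tg)::rest) (gmInner pg rest (m,used)).2
          = pvRem rest (gmInner pg rest (m,used)).2 := by
        simp [pvRem, hc2]
      rw [hgm]
      refine ⟨by rw [h1, hrem], by rw [hrem2, h2, hrem], h3, ?_⟩
      intro j hj
      rcases h4 j hj with h | h
      · exact Or.inl h
      · exact Or.inr (by simp [h])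
    · have hrem : pvRem ((i,tg)::rest) used = tg :: pvRem rest used := by
        simp [pvRem, hc]
      by_cases he : pg = tg
      · have hgm : gmInner pg ((i,tg)::rest) (m, used) = (m + 1, PySem.Set.add used i) := by
          simp [gmInner, hc, he]
        rw [hgm, hrem]
        have htail : pvRem rest (PySem.Set.add used i) = pvRem rest used := by
          unfold pvRem
          congr 1
          apply List.filter_congr
          intro p hp
          have hpi : p.1 ≠ i := by
            intro hcon
            exact hi (hcon ▸ List.mem_map_of_mem hp)
          simp [PySem.Set.mem_add, hpi]
        refine ⟨by simp [he], ?_, ?_, ?_⟩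
        · rw [he, List.erase_cons_head]
          have hhead : i ∈ PySem.Set.add used i := by simp [PySem.Set.mem_add]
          simpa [pvRem, hhead] using htail
        · intro j hj
          simp [PySem.Set.mem_add, hj]
        · intro j hj
          rcases (PySem.Set.mem_add _ _ _).mp hj with h | h
          · exact Or.inl h
          · exact Or.inr (by simp [h])
      · have hgm : gmInner pg ((i,tg)::rest) (m, used) = gmInner pg rest (m, used) := by
          simp [gmInner, hc, he]
        obtain ⟨h1, h2, h3, h4⟩ := ih m used hndr
        have hc2 : i ∉ (gmInner pg rest (m,used)).2 := by
          intro hmem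
          rcases h4 i hmem with h | h
          · exact hc h
          · exact hi h
        have hrem2 : pvRem ((i,tg)::rest) (gmInner pg rest (m,used)).2
            = tg :: pvRem rest (gmInner pg rest (m,used)).2 := by
          simp [pvRem, hc2]
        rw [hgm, hrem, hrem2]
        refine ⟨?_, ?_, h3, ?_⟩
        · rw [h1]; simp [he]
        · rw [h2, List.erase_cons_tail]
          simp [Ne.symm he]
        · intro j hj
          rcases h4 j hj with h | h
          · exact Or.inl h
          · exact Or.inr (by simp [h])

lemma foldl_gmInner_spec (tgs : List (Int × List String)) (hnd : (tgs.map (·.1)).Nodup) :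
    ∀ (ps : List (List String)) (m : Int) (used : PySem.Set Int),
    (ps.foldl (fun st pg => gmInner pg tgs st) (m, used)).1
      = m + (pvM ps (pvRem tgs used) : Int) := by
  intro ps
  induction ps with
  | nil => intro m used; simp [pvM]
  | cons p ps ih =>
    intro m used
    obtain ⟨h1, h2, _, _⟩ := gmInner_spec p tgs m used hnd
    have hfold : ((p :: ps).foldl (fun st pg => gmInner pg tgs st) (m, used))
        = ps.foldl (fun st pg => gmInner pg tgs st)
            ((gmInner p tgs (m, used)).1, (gmInner p tgs (m, used)).2) := by
      simp [List.foldl_cons]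
    rw [hfold, ih, h1, h2]
    by_cases hmem : p ∈ pvRem tgs used
    · simp [pvM, hmem]; ring
    · simp [pvM, hmem, List.erase_of_not_mem hmem]

lemma groups_match_eq_pvM (pred_groups true_groups : List (List String)) :
    groups_match pred_groups true_groups = (pvM pred_groups true_groups : Int) := by
  have hnd : ((PySem.List.enumerate true_groups).map (·.1)).Nodup := by
    have := PySem.List.pairwise_lt_enumerate (xs := true_groups) (s := 0)
    exact (List.pairwise_map).mpr (this.imp (fun h => ne_of_lt h))
  have hrem : pvRem (PySem.List.enumerate true_groups) PySem.Set.empty = true_groups := by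
    unfold pvRem
    rw [List.filter_eq_self.mpr, PySem.List.map_snd_enumerate]
    intro p _
    simp [PySem.Set.empty]
  unfold groups_match
  rw [foldl_gmInner_spec (PySem.List.enumerate true_groups) hnd pred_groups 0 PySem.Set.empty,
      hrem]
  ring

lemma pvT_cons (p : List String) (ps rem : List (List String)) :
    pvT (p :: ps) rem = (if p ∈ rem then 1 else 0) + pvT ps (rem.erase p) := by
  unfold pvT
  rw [List.toFinset_cons]
  rw [← Finset.add_sum_erase _ _ (Finset.mem_insert_self p ps.toFinset),
      Finset.erase_insert_eq_erase]
  have hcount : ∀ k ∈ ps.toFinset.erase p,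
      min ((p :: ps).count k) (rem.count k) = min (ps.count k) ((rem.erase p).count k) := by
    intro k hk
    have hkp : k ≠ p := (Finset.mem_erase.mp hk).1
    rw [List.count_cons_of_ne (Ne.symm hkp), List.count_erase_of_ne hkp]
  by_cases hp : p ∈ ps.toFinset
  · rw [← Finset.add_sum_erase _ _ hp, Finset.sum_congr rfl hcount]
    have h1 : (p :: ps).count p = ps.count p + 1 := List.count_cons_self
    have h2 : (rem.erase p).count p = rem.count p - 1 := List.count_erase_self
    rw [h1, h2]
    by_cases hm : p ∈ rem
    · have hmc : 0 < rem.count p := List.count_pos_iff.mpr hm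
      simp only [hm, if_true]
      omega
    · have hmc : rem.count p = 0 := List.count_eq_zero.mpr hm
      simp only [hm, if_false]
      omega
  · rw [Finset.erase_eq_of_notMem hp]
    have h0 : ps.count p = 0 := List.count_eq_zero.mpr (by simpa using hp)
    have hsum : ∑ k ∈ ps.toFinset, min ((p :: ps).count k) (rem.count k)
        = ∑ k ∈ ps.toFinset, min (ps.count k) ((rem.erase p).count k) := by
      apply Finset.sum_congr rfl
      intro k hk
      exact hcount k (Finset.mem_erase.mpr ⟨by rintro rfl; exact hp hk, hk⟩)
    rw [hsum, List.count_cons_self, h0]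
    by_cases hm : p ∈ rem
    · have hmc : 0 < rem.count p := List.count_pos_iff.mpr hm
      simp only [hm, if_true]
      omega
    · have hmc : rem.count p = 0 := List.count_eq_zero.mpr hm
      simp only [hm, if_false]
      omega

lemma pvM_eq_pvT (ps : List (List String)) : ∀ rem, pvM ps rem = pvT ps rem := by
  induction ps with
  | nil => intro rem; simp [pvM, pvT]
  | cons p ps ih =>
    intro rem
    rw [pvT_cons]
    unfold pvM
    by_cases hm : p ∈ rem
    · simp [hm, ih]
    · simp [hm, ih, List.erase_of_not_mem hm]

lemma gmCounter_eq (gs : List (List String)) : gmCounter gs = PySem.Dict.counter gs :=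
  PySem.Dict.foldl_insert_getD_add_one_eq_counter gs

lemma groups_match_alt_eq_pvT (pred_groups true_groups : List (List String)) :
    groups_match_alt pred_groups true_groups = (pvT pred_groups true_groups : Int) := by
  show (gmCounter pred_groups).items.foldl
      (fun total kc => total + min kc.2 ((gmCounter true_groups).getD kc.1 0)) 0
      = (pvT pred_groups true_groups : Int)
  rw [gmCounter_eq, gmCounter_eq, PySem.Dict.items_counter, PySem.List.foldl_add]
  simp only [List.map_map]
  have hmap : ((PySem.Set.ofList pred_groups).map
      ((fun kc : List String × Int => min kc.2 ((PySem.Dict.counter true_groups).getD kc.1 0)) ∘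
        (fun k => (k, (pred_groups.count k : Int)))))
      = (PySem.Set.ofList pred_groups).map
          (fun k => ((min (pred_groups.count k) (true_groups.count k) : Nat) : Int)) := by
    apply List.map_congr_left
    intro k _
    simp [PySem.Dict.getD_counter, Nat.cast_min]
  rw [hmap]
  have hsum : ((PySem.Set.ofList pred_groups).map
      (fun k => ((min (pred_groups.count k) (true_groups.count k) : Nat) : Int))).sum
      = (((PySem.Set.ofList pred_groups).map
          (fun k => min (pred_groups.count k) (true_groups.count k))).sum : Nat) := by
    rw [Nat.cast_list_sum, List.map_map]
    rfl
  rw [hsum]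
  have hfin : ((PySem.Set.ofList pred_groups).map
      (fun k => min (pred_groups.count k) (true_groups.count k))).sum
      = pvT pred_groups true_groups := by
    unfold pvT
    rw [← List.sum_toFinset _ (PySem.Set.nodup_ofList pred_groups)]
    apply Finset.sum_congr _ (fun _ _ => rfl)
    apply Finset.ext
    intro a
    simp [PySem.Set.mem_ofList]
  rw [hfin]
  simp

-- ===== VERDICT (by name: the statement is the Claim_ definition above) =====
theorem groups_match_spec : Claim_equal_groups_match := by
  intro pred_groups true_groups _
  unfold Spec_groups_match
  rw [groups_match_eq_pvM, groups_match_alt_eq_pvT, pvM_eq_pvT]
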